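-- pv_equiv track=rewrite | github.com/Mansi072003/python_day_1 | Day_9/Attendance_checker/employee.py | check_absent
-- ===== SOURCE A (Python) =====
-- def check_absent(emp):
--     records = list(emp["Attendance"].values())
--     max_streak = 0
--     current_streak = 0
--
--     for day in records:
--         if day == "a":
--             current_streak += 1
--             max_streak = max(max_streak, current_streak)
--         else:
--             current_streak = 0
--
--     return max_streak > 3
-- ===== SOURCE B (Python) =====
-- def check_absent(emp):
--     records = list(emp["Attendance"].values())
--     # run-based scan: repeatedly peel off the leading run of equal values;
--     # answer is whether some run of "a" is longer than 3
--     while records: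
--         head = records[0]
--         run = 1
--         while run < len(records) and records[run] == head:
--             run += 1
--         if head == "a" and run > 3:
--             return True
--         records = records[run:]
--     return False
-- ===== Notes on version B (the rewrite author's own statement) =====
-- stated objective: alternative
-- what changed: Replaces the running current/max streak counters with a run-based scan that peels off each maximal run of equal values and checks whether an 'a'-run is longer than 3, returning early; Pre_ excludes inputs without an 'Attendance' key, on which A raises KeyError (B raises too).
import Mathlib
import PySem

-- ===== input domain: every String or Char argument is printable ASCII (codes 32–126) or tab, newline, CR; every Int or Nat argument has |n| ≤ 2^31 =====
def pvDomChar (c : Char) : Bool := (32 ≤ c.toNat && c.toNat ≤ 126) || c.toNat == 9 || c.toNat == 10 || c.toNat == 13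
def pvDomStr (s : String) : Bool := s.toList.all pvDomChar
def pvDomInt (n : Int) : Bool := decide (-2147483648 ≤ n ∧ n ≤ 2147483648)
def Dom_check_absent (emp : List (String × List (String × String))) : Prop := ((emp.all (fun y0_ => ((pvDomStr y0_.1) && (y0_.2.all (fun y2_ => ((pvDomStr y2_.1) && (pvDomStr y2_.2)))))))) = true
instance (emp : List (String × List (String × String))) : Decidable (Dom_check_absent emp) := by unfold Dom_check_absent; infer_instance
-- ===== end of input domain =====

-- B replaces A's running current/max streak counters by a run-based scan over maximal runs
-- of equal values (alternative decomposition, same O(n) cost); return-value equivalence.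

-- ===== PORT A =====
-- emp["Attendance"]: first matching key (Python dicts have unique keys); Pre_ guarantees presence.
def pvAttendance (emp : List (String × List (String × String))) : List (String × String) :=
  match emp.find? (fun p => p.1 == "Attendance") with
  | some p => p.2
  | none => []   -- unreachable under Pre_check_absent (Python raises KeyError)

-- the for-loop over records with (max_streak, current_streak); returns max_streak
def aLoop (ms cs : Nat) : List String → Nat
  | [] => ms
  | day :: rest =>
    if day = "a" then aLoop (max ms (cs + 1)) (cs + 1) rest
    else aLoop ms 0 rest

def check_absent (emp : List (String × List (String × String))) : Bool :=
  decide (3 < aLoop 0 0 ((pvAttendance emp).map Prod.snd))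

-- ===== PORT B =====
-- the outer while-loop of Source B: peel the leading run of values equal to the head
def bLoop : List String → Bool
  | [] => false
  | head :: rest =>
    let run := 1 + (rest.takeWhile (fun y => y == head)).length
    if head = "a" ∧ 3 < run then true
    else bLoop (rest.dropWhile (fun y => y == head))
termination_by l => l.length
decreasing_by
  simp only [List.length_cons]
  exact Nat.lt_succ_of_le (List.length_dropWhile_le _ _)

def check_absent_alt (emp : List (String × List (String × String))) : Bool :=
  bLoop ((pvAttendance emp).map Prod.snd)

-- ===== PRECONDITION & SPEC =====
-- Pre_ excludes inputs without an "Attendance" key: there the Python A raises KeyError.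
def Pre_check_absent (emp : List (String × List (String × String))) : Prop :=
  (emp.any (fun p => p.1 == "Attendance")) = true
instance (emp : List (String × List (String × String))) : Decidable (Pre_check_absent emp) := by unfold Pre_check_absent; infer_instance
def pvWitness_check_absent : (List (String × List (String × String))) :=
  [("Attendance", [("Mon", "a"), ("Tue", "p")])]
def Spec_check_absent (emp : List (String × List (String × String))) (out : Bool) : Prop := out = check_absent_alt emp
instance (emp : List (String × List (String × String))) (out : Bool) : Decidable (Spec_check_absent emp out) := by unfold Spec_check_absent; infer_instance

-- ===== CLAIM (what is proved, stated in full; the proofs are below) =====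
def Claim_equal_check_absent : Prop := ∀ (emp : List (String × List (String × String))), Dom_check_absent emp → Pre_check_absent emp → Spec_check_absent emp (check_absent emp)

-- ===== LEMMAS AND PROOFS =====

-- the pure "best future streak from pending count cs" function characterising A's loop
def best (cs : Nat) : List String → Nat
  | [] => 0
  | day :: rest =>
    if day = "a" then max (cs + 1) (best (cs + 1) rest)
    else best 0 rest

theorem aLoop_eq_best (l : List String) : ∀ ms cs, aLoop ms cs l = max ms (best cs l) := by
  induction l with
  | nil => intro ms cs; simp [aLoop, best]
  | cons d rest ih =>
    intro ms cs
    simp only [aLoop, best]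
    split
    · rw [ih]; omega
    · rw [ih]

-- skipping a run of non-"a" values leaves best 0 unchanged
theorem best_skip (t : List String) (d : List String) (h : ∀ y ∈ t, y ≠ "a") :
    best 0 (t ++ d) = best 0 d := by
  induction t with
  | nil => rfl
  | cons y t' ih =>
    simp only [List.cons_append, best]
    rw [if_neg (h y (by simp))]
    exact ih (fun z hz => h z (by simp [hz]))

-- consuming a nonempty all-"a" run
theorem best_runA (t : List String) : ∀ (d : List String) (cs : Nat), (∀ y ∈ t, y = "a") → t ≠ [] →
    best cs (t ++ d) = max (cs + t.length) (best (cs + t.length) d) := by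
  induction t with
  | nil => intro d cs _ hne; exact absurd rfl hne
  | cons y t' ih =>
    intro d cs h _
    simp only [List.cons_append, best]
    rw [if_pos (h y (by simp))]
    rcases t' with _ | ⟨z, t''⟩
    · simp
    · rw [ih d (cs + 1) (fun w hw => h w (by simp [hw])) (by simp)]
      simp only [List.length_cons]
      have he : cs + 1 + (t''.length + 1) = cs + (t''.length + 1 + 1) := by omega
      rw [he]
      omega
-- best is insensitive to cs when the list does not start with "a"
theorem best_reset (d : List String) (h : ∀ z ∈ d.head?, z ≠ "a") (c : Nat) :
    best c d = best 0 d := by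
  rcases d with _ | ⟨z, d'⟩
  · rfl
  · simp only [best]
    rw [if_neg (h z (by simp)), if_neg (h z (by simp))]

theorem dropWhile_head_ne (p : String → Bool) (l : List String) :
    ∀ z ∈ (l.dropWhile p).head?, p z = false := by
  intro z hz
  have hne : l.dropWhile p ≠ [] := by
    intro h
    rw [h] at hz
    simp at hz
  have h1 : (l.dropWhile p).head hne = z := by
    rw [Option.mem_def, List.head?_eq_some_head hne] at hz
    simpa using hz
  have h2 := List.head_dropWhile_not p hne
  rw [h1] at h2
  simpa using h2

theorem best_cons_a (rest : List String) :
    best 0 ("a" :: rest) = max ((rest.takeWhile (fun y => y == "a")).length + 1)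
      (best 0 (rest.dropWhile (fun y => y == "a"))) := by
  have hall : ∀ y ∈ ("a" :: rest.takeWhile (fun y => y == "a")), y = "a" := by
    intro y hy
    rcases List.mem_cons.mp hy with rfl | hy
    · rfl
    · simpa using List.mem_takeWhile_imp hy
  calc best 0 ("a" :: rest)
      = best 0 (("a" :: rest.takeWhile (fun y => y == "a")) ++ rest.dropWhile (fun y => y == "a")) := by
        rw [List.cons_append, List.takeWhile_append_dropWhile]
    _ = max ((rest.takeWhile (fun y => y == "a")).length + 1)
        (best ((rest.takeWhile (fun y => y == "a")).length + 1) (rest.dropWhile (fun y => y == "a"))) := by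
        rw [best_runA _ _ _ hall (by simp)]
        simp
    _ = _ := by
        rw [best_reset _ (fun z hz => by simpa using dropWhile_head_ne (fun y => y == "a") rest z hz)]

theorem best_cons_ne (head : String) (rest : List String) (h : head ≠ "a") :
    best 0 (head :: rest) = best 0 (rest.dropWhile (fun y => y == head)) := by
  conv_lhs => rw [show (head :: rest)
      = (head :: rest.takeWhile (fun y => y == head)) ++ rest.dropWhile (fun y => y == head) by
    rw [List.cons_append, List.takeWhile_append_dropWhile]]
  apply best_skip
  intro y hy
  rcases List.mem_cons.mp hy with rfl | hy
  · exact h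
  · have := List.mem_takeWhile_imp hy
    simp at this
    simpa [this] using h

theorem bLoop_cons (head : String) (rest : List String) :
    bLoop (head :: rest)
      = ((decide (head = "a") && decide (3 < 1 + (rest.takeWhile (fun y => y == head)).length))
          || bLoop (rest.dropWhile (fun y => y == head))) := by
  rw [bLoop]
  by_cases hh : head = "a" ∧ 3 < 1 + (rest.takeWhile (fun y => y == head)).length
  · rw [if_pos hh]
    obtain ⟨h1, h2⟩ := hh
    subst h1
    simp [h2]
  · rw [if_neg hh]
    rcases Decidable.not_and_iff_not_or_not.mp hh with h | h <;> simp [h]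

theorem key (l : List String) : bLoop l = decide (3 < best 0 l) := by
  induction hn : l.length using Nat.strong_induction_on generalizing l with
  | _ n ih =>
  rcases l with _ | ⟨head, rest⟩
  · simp [bLoop, best]
  · rw [bLoop_cons]
    have hlen : (rest.dropWhile (fun y => y == head)).length < n := by
      have := List.length_dropWhile_le (fun y => y == head) rest
      simp only [List.length_cons] at hn
      omega
    rw [ih _ hlen _ rfl]
    by_cases hh : head = "a"
    · subst hh
      rw [best_cons_a]
      have h1 : (3 < max ((rest.takeWhile (fun y => y == "a")).length + 1)
          (best 0 (rest.dropWhile (fun y => y == "a"))))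
          ↔ (3 < 1 + (rest.takeWhile (fun y => y == "a")).length
              ∨ 3 < best 0 (rest.dropWhile (fun y => y == "a"))) := by omega
      simp [h1, Bool.decide_or]
    · rw [best_cons_ne head rest hh]
      simp [hh]

-- ===== VERDICT (by name: the statement is the Claim_ definition above) =====
theorem check_absent_spec : Claim_equal_check_absent := by
  intro emp _ _
  unfold Spec_check_absent check_absent check_absent_alt
  rw [key, aLoop_eq_best]
  simp
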